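-- pv_equiv track=rewrite | github.com/akhandsingh17/assignments | codingexercise/CharactersFrequencyOrderOccurence.py | CharactersFrequencyOrderOccurence
-- ===== SOURCE A (Python) =====
-- import collections
--
-- def CharactersFrequencyOrderOccurence(str1):
--
--     lst=list(str1)
--
--     dict=collections.Counter(str1)
--
--     tmp=[]
--     fnl_lst=[]
--     for i in range(0,len(lst)):
--
--         key=lst[i]
--
--         if key not in tmp:
--             val=dict[key]
--
--             fnl_lst.append(key+str(val))
--             tmp.append(key)
--
--     return ''.join(fnl_lst)
-- ===== SOURCE B (Python) =====
-- def CharactersFrequencyOrderOccurence(str1):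
--     counts = {}
--     for ch in str1:
--         counts[ch] = counts.get(ch, 0) + 1
--     out = []
--     for ch, n in counts.items():
--         out.append(ch + str(n))
--     return ''.join(out)
-- ===== Notes on version B (the rewrite author's own statement) =====
-- stated objective: simpler
-- what changed: B drops A's Counter plus per-position seen-list dedup loop (a membership scan at every character) and instead builds one insertion-ordered dict of running counts in a single pass, then emits key+str(count) once per unique key from its items.
import Mathlib
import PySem

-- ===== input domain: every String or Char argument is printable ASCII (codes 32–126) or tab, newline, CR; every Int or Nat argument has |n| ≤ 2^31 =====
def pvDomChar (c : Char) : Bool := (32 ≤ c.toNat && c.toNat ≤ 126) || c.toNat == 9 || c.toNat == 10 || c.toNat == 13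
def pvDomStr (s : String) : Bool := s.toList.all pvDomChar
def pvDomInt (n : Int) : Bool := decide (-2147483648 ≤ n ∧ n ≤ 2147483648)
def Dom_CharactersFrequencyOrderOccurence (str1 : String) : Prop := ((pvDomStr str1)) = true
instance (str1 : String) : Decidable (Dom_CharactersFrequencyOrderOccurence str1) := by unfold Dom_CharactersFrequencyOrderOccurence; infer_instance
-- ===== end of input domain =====

-- B replaces A's Counter + seen-list dedup loop over every position by one counting
-- pass into an ordinary insertion-ordered dict and one output loop over its unique
-- items (objective: simpler; the per-position membership branch disappears).

-- ===== PORT A =====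
-- A: lst = list(str1); dict = Counter(str1); loop i in range(0, len(lst)) with a seen
-- list 'tmp' and an output list 'fnl_lst'; return ''.join(fnl_lst).
def CharactersFrequencyOrderOccurence (str1 : String) : String :=
  let lst := str1.toList
  let dict := PySem.Dict.counter lst
  let r := (PySem.List.pyRange 0 (lst.length : Int) 1).foldl
    (fun (s : List Char × List (List Char)) i =>
      let key := PySem.List.pyGetD lst i ' '   -- lst[i]; i is always in range here
      if key ∈ s.1 then s
      else (s.1 ++ [key], s.2 ++ [key :: (PySem.Int.toStr (dict.getD key 0)).toList]))
    ([], [])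
  String.ofList r.2.flatten

-- ===== PORT B =====
-- B: one pass building counts[ch] = counts.get(ch, 0) + 1, then one loop over
-- counts.items() appending ch + str(n); ''.join of those.
def CharactersFrequencyOrderOccurence_alt (str1 : String) : String :=
  let counts := str1.toList.foldl
    (fun (d : PySem.Dict Char Int) ch => d.insert ch (d.getD ch 0 + 1)) PySem.Dict.empty
  String.ofList ((counts.items.map (fun p => p.1 :: (PySem.Int.toStr p.2).toList)).flatten)

-- ===== PRECONDITION & SPEC =====
def Spec_CharactersFrequencyOrderOccurence (str1 : String) (out : String) : Prop := out = CharactersFrequencyOrderOccurence_alt str1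
instance (str1 : String) (out : String) : Decidable (Spec_CharactersFrequencyOrderOccurence str1 out) := by unfold Spec_CharactersFrequencyOrderOccurence; infer_instance

-- ===== CLAIM (what is proved, stated in full; the proofs are below) =====
def Claim_equal_CharactersFrequencyOrderOccurence : Prop := ∀ (str1 : String), Dom_CharactersFrequencyOrderOccurence str1 → Spec_CharactersFrequencyOrderOccurence str1 (CharactersFrequencyOrderOccurence str1)

-- ===== LEMMAS AND PROOFS =====

-- Set.update only appends: the old set is a prefix of the updated one.
theorem pv_update_prefix (l s : List Char) : ∃ t, PySem.Set.update s l = s ++ t := by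
  induction l generalizing s with
  | nil => exact ⟨[], by simp [PySem.Set.update]⟩
  | cons x xs ih =>
    have hadd : PySem.Set.add s x = s ∨ PySem.Set.add s x = s ++ [x] := by
      simp only [PySem.Set.add]; split_ifs <;> simp
    rcases ih (PySem.Set.add s x) with ⟨t, ht⟩
    rcases hadd with h | h
    · exact ⟨t, by simpa [PySem.Set.update, h] using ht⟩
    · exact ⟨x :: t, by simpa [PySem.Set.update, h] using ht⟩

-- A's seen-list loop: the output accumulates f over the NEW first occurrences,
-- i.e. over (Set.update tmp lst) past the prefix tmp.
theorem pv_dedup_loop (f : Char → List Char) (lst : List Char) :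
    ∀ (tmp : List Char) (fnl : List (List Char)),
    lst.foldl
      (fun (s : List Char × List (List Char)) key =>
        if key ∈ s.1 then s else (s.1 ++ [key], s.2 ++ [f key]))
      (tmp, fnl)
    = (PySem.Set.update tmp lst,
       fnl ++ ((PySem.Set.update tmp lst).drop tmp.length).map f) := by
  induction lst with
  | nil => intro tmp fnl; simp [PySem.Set.update]
  | cons key rest ih =>
    intro tmp fnl
    by_cases h : key ∈ tmp
    · have hadd : PySem.Set.add tmp key = tmp := by
        simp [PySem.Set.add, PySem.Set.contains, h]
      simp only [List.foldl_cons, if_pos h]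
      rw [ih tmp fnl]
      have : PySem.Set.update tmp (key :: rest) = PySem.Set.update tmp rest := by
        simp [PySem.Set.update, hadd]
      rw [this]
    · have hadd : PySem.Set.add tmp key = tmp ++ [key] := by
        simp [PySem.Set.add, PySem.Set.contains, h]
      have hupd : PySem.Set.update tmp (key :: rest) = PySem.Set.update (tmp ++ [key]) rest := by
        simp [PySem.Set.update, hadd]
      simp only [List.foldl_cons, if_neg h]
      rw [ih (tmp ++ [key]) (fnl ++ [f key]), hupd]
      rcases pv_update_prefix rest (tmp ++ [key]) with ⟨t, ht⟩
      rw [ht]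
      have h2 : (tmp ++ [key] ++ t).drop tmp.length = key :: t := by
        rw [List.append_assoc, List.drop_left' rfl]; rfl
      rw [h2]
      simp

theorem CharactersFrequencyOrderOccurence_eq (str1 : String) :
    CharactersFrequencyOrderOccurence str1 = CharactersFrequencyOrderOccurence_alt str1 := by
  simp only [CharactersFrequencyOrderOccurence, CharactersFrequencyOrderOccurence_alt]
  rw [PySem.List.foldl_pyRange_zero_pyGetD' str1.toList ' '
        (fun (s : List Char × List (List Char)) key =>
          if key ∈ s.1 then s
          else (s.1 ++ [key],
                s.2 ++ [key :: (PySem.Int.toStr ((PySem.Dict.counter str1.toList).getD key 0)).toList]))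
        ([], []),
      pv_dedup_loop (fun key =>
        key :: (PySem.Int.toStr ((PySem.Dict.counter str1.toList).getD key 0)).toList) str1.toList [] [],
      PySem.Dict.foldl_insert_getD_add_one_eq_counter]
  simp [PySem.Dict.items_counter, PySem.Set.update, PySem.Set.ofList_eq_foldl,
        PySem.Dict.getD_counter, Function.comp_def]

-- ===== VERDICT (by name: the statement is the Claim_ definition above) =====
theorem CharactersFrequencyOrderOccurence_spec : Claim_equal_CharactersFrequencyOrderOccurence := by
  intro str1 _
  exact CharactersFrequencyOrderOccurence_eq str1
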